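-- pv_equiv track=rewrite | github.com/vladkostikov/HSP | entrance/tree_of_life.py | mark_branches_for_destruction
-- ===== SOURCE A (Python) =====
-- def mark_branches_for_destruction(tree: list) -> list:
--     for index_line, line in enumerate(tree):
--         for index_branch, branch in enumerate(line):
--             if branch[1] != "Old":
--                 continue
--
--             side_branches = []
--             if index_line > 0:
--                 upper_branch = tree[index_line - 1][index_branch]
--                 side_branches.append(upper_branch)
--
--             if index_line < (len(tree) - 1):
--                 lower_branch = tree[index_line + 1][index_branch]
--                 side_branches.append(lower_branch)
--
--             if index_branch > 0:
--                 left_branch = tree[index_line][index_branch - 1]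
--                 side_branches.append(left_branch)
--
--             if index_branch < (len(line) - 1):
--                 right_branch = tree[index_line][index_branch + 1]
--                 side_branches.append(right_branch)
--
--             for side_branch in side_branches:
--                 if side_branch[1] == "Young":
--                     side_branch[1] = "Destroy"
--     return tree
-- ===== SOURCE B (Python) =====
-- def mark_branches_for_destruction(tree: list) -> list:
--     to_destroy = []
--     rows = len(tree)
--     for i in range(rows):
--         line = tree[i]
--         cols = len(line)
--         for j in range(cols):
--             if line[j][1] != "Young":
--                 continue
--             if ((i > 0 and j < len(tree[i - 1]) and tree[i - 1][j][1] == "Old")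
--                     or (i + 1 < rows and j < len(tree[i + 1]) and tree[i + 1][j][1] == "Old")
--                     or (j > 0 and line[j - 1][1] == "Old")
--                     or (j + 1 < cols and line[j + 1][1] == "Old")):
--                 to_destroy.append((i, j))
--     for i, j in to_destroy:
--         tree[i][j][1] = "Destroy"
--     return tree
-- ===== Notes on version B (the rewrite author's own statement) =====
-- stated objective: alternative
-- what changed: A marks Young neighbours as Destroy in place while it is still scanning the grid it mutates; B is a two-pass scheme that first collects the coordinates of every Young cell having an Old 4-neighbour (bounds-guarded reads of the untouched grid) and then writes Destroy at the collected coordinates.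
import Mathlib
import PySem

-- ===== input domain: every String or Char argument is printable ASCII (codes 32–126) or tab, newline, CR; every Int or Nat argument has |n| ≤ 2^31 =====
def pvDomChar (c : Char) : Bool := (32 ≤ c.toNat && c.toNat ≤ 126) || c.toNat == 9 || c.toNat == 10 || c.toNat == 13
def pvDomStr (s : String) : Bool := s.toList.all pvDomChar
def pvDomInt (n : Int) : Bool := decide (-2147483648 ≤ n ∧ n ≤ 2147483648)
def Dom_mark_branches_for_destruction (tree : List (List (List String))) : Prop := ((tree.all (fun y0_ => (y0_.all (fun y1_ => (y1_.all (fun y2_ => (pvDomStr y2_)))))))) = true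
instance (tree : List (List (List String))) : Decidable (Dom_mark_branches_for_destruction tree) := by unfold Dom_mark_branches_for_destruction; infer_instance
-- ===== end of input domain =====

-- B replaces A's in-place marking of neighbours while scanning (mutating the grid it is still reading)
-- by a two-pass scheme: first collect the coordinates of every Young cell with an Old 4-neighbour,
-- then set those cells to Destroy (objective: alternative decomposition, same cost).
-- Python A and B mutate `tree` in place and return it; the equivalence proved here is about the returned value.

-- shared tiny helpers (both Pythons read cell[1] and write cell[1] = "Destroy")
def pvStatus (c : List String) : String := c.getD 1 ""
def pvCell (t : List (List (List String))) (i j : Nat) : List String := (t.getD i []).getD j []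
def pvRowLen (t : List (List (List String))) (i : Nat) : Nat := (t.getD i []).length
def pvSetD (t : List (List (List String))) (i j : Nat) : List (List (List String)) :=
  t.set i ((t.getD i []).set j ((pvCell t i j).set 1 "Destroy"))

-- ===== PORT A =====
-- `side_branch[1] == "Young" → side_branch[1] = "Destroy"` on one collected neighbour
def pvMark (t : List (List (List String))) (p q : Nat) : List (List (List String)) :=
  if pvStatus (pvCell t p q) = "Young" then pvSetD t p q else t

-- A's `side_branches` list, as coordinates (R = len(tree), L = len(line))
def pvNbrs (R L i j : Nat) : List (Nat × Nat) :=
  (if 0 < i then [(i - 1, j)] else []) ++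
  (if i < R - 1 then [(i + 1, j)] else []) ++
  (if 0 < j then [(i, j - 1)] else []) ++
  (if j < L - 1 then [(i, j + 1)] else [])

-- body of A's inner loop (one branch of row i; reads and writes the current grid t)
def pvRowStep (R i : Nat) (t : List (List (List String))) (j : Nat) : List (List (List String)) :=
  if pvStatus (pvCell t i j) ≠ "Old" then t
  else (pvNbrs R (pvRowLen t i) i j).foldl (fun t pq => pvMark t pq.1 pq.2) t

-- body of A's outer loop (one row)
def pvOuterStep (R : Nat) (t : List (List (List String))) (i : Nat) : List (List (List String)) :=
  (List.range (pvRowLen t i)).foldl (pvRowStep R i) t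

def mark_branches_for_destruction (tree : List (List (List String))) : List (List (List String)) :=
  (List.range tree.length).foldl (pvOuterStep tree.length) tree

-- ===== PORT B =====
-- B's neighbour test: does the Young cell (i, j) have an Old 4-neighbour? (bounds-guarded reads)
def pvNbOld (t : List (List (List String))) (rows i j : Nat) : Bool :=
  (decide (0 < i) && decide (j < pvRowLen t (i - 1)) && decide (pvStatus (pvCell t (i - 1) j) = "Old")) ||
  (decide (i + 1 < rows) && decide (j < pvRowLen t (i + 1)) && decide (pvStatus (pvCell t (i + 1) j) = "Old")) ||
  (decide (0 < j) && decide (pvStatus (pvCell t i (j - 1)) = "Old")) ||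
  (decide (j + 1 < pvRowLen t i) && decide (pvStatus (pvCell t i (j + 1)) = "Old"))

-- B's inner collecting loop over row i (appends coordinates to to_destroy)
def pvRowCollect (t : List (List (List String))) (rows i : Nat) (acc : List (Nat × Nat)) : List (Nat × Nat) :=
  (List.range (pvRowLen t i)).foldl
    (fun acc j =>
      if pvStatus (pvCell t i j) ≠ "Young" then acc
      else if pvNbOld t rows i j then acc ++ [(i, j)] else acc) acc

def mark_branches_for_destruction_alt (tree : List (List (List String))) : List (List (List String)) :=
  let rows := tree.length
  let toDestroy := (List.range rows).foldl (fun acc i => pvRowCollect tree rows i acc) []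
  toDestroy.foldl (fun t pq => pvSetD t pq.1 pq.2) tree

-- ===== PRECONDITION & SPEC =====
-- Pre_ = exactly the inputs where Python A returns: every cell has length ≥ 2 (A reads branch[1]
-- of every cell), and every Old cell's vertical neighbour access is in range (A indexes the
-- adjacent row without a bounds check and raises IndexError on short rows).
def Pre_mark_branches_for_destruction (tree : List (List (List String))) : Prop :=
  (∀ row ∈ tree, ∀ c ∈ row, 2 ≤ c.length) ∧
  (∀ i < tree.length, ∀ j < pvRowLen tree i, pvStatus (pvCell tree i j) = "Old" →
    (0 < i → j < pvRowLen tree (i - 1)) ∧ (i + 1 < tree.length → j < pvRowLen tree (i + 1)))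
instance (tree : List (List (List String))) : Decidable (Pre_mark_branches_for_destruction tree) := by
  unfold Pre_mark_branches_for_destruction; infer_instance

def pvWitness_mark_branches_for_destruction : List (List (List String)) :=
  [[["a", "Old"], ["b", "Young"]], [["c", "Young"], ["d", "Dead"]]]

def Spec_mark_branches_for_destruction (tree : List (List (List String))) (out : List (List (List String))) : Prop := out = mark_branches_for_destruction_alt tree
instance (tree : List (List (List String))) (out : List (List (List String))) : Decidable (Spec_mark_branches_for_destruction tree out) := by unfold Spec_mark_branches_for_destruction; infer_instance

-- ===== CLAIM (what is proved, stated in full; the proofs are below) =====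
def Claim_equal_mark_branches_for_destruction : Prop := ∀ (tree : List (List (List String))), Dom_mark_branches_for_destruction tree → Pre_mark_branches_for_destruction tree → Spec_mark_branches_for_destruction tree (mark_branches_for_destruction tree)

-- ===== LEMMAS AND PROOFS =====

-- `pvApply t S` marks every Young cell of t whose coordinates are in S; both loops compute it.
def pvApply (t : List (List (List String))) (S : List (Nat × Nat)) : List (List (List String)) :=
  t.mapIdx (fun i row => row.mapIdx (fun j c =>
    if (i, j) ∈ S ∧ pvStatus c = "Young" then c.set 1 "Destroy" else c))

lemma young_one_lt {c : List String} (h : pvStatus c = "Young") : 1 < c.length := by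
  by_contra hlen
  rw [pvStatus, List.getD_eq_default _ _ (by omega)] at h
  exact absurd h (by decide)

lemma young_lt {t : List (List (List String))} {i j : Nat}
    (h : pvStatus (pvCell t i j) = "Young") : i < t.length ∧ j < pvRowLen t i := by
  constructor
  · by_contra hi
    have h0 : t.getD i [] = [] := List.getD_eq_default _ _ (by omega)
    rw [pvCell, h0] at h
    simp [pvStatus] at h
  · by_contra hj
    unfold pvRowLen at hj
    rw [pvCell, List.getD_eq_default _ _ (by omega)] at h
    simp [pvStatus] at h

lemma getD_mapIdx {α β : Type} (l : List α) (f : Nat → α → β) (i : Nat) (dα : α) (dβ : β)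
    (h : i < l.length) : (l.mapIdx f).getD i dβ = f i (l.getD i dα) := by
  rw [List.getD_eq_getElem _ _ (by simpa using h), List.getD_eq_getElem _ _ h,
    List.getElem_mapIdx]

lemma getD_set_self {α : Type} (l : List α) (n : Nat) (a : α) (d : α) (h : n < l.length) :
    (l.set n a).getD n d = a := by
  rw [List.getD_eq_getElem _ _ (by simpa using h)]
  simp [List.getElem_set_self]

lemma getD_set_ne {α : Type} (l : List α) (n i : Nat) (a : α) (d : α) (h : i ≠ n) :
    (l.set n a).getD i d = l.getD i d := by
  by_cases hi : i < l.length
  · rw [List.getD_eq_getElem _ _ (by simpa using hi), List.getD_eq_getElem _ _ hi,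
      List.getElem_set_ne (by omega)]
  · rw [List.getD_eq_default _ _ (by simp; omega), List.getD_eq_default _ _ (by omega)]

lemma status_set_destroy {c : List String} (h : 1 < c.length) :
    pvStatus (c.set 1 "Destroy") = "Destroy" := by
  rw [pvStatus, List.getD_eq_getElem _ _ (by simpa using h)]
  simp

lemma cell_apply (t : List (List (List String))) (S : List (Nat × Nat)) (i j : Nat) :
    pvCell (pvApply t S) i j =
      if (i, j) ∈ S ∧ pvStatus (pvCell t i j) = "Young"
      then (pvCell t i j).set 1 "Destroy" else pvCell t i j := by
  by_cases hi : i < t.length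
  · rw [pvApply, pvCell, getD_mapIdx t _ i [] [] hi]
    by_cases hj : j < (t.getD i []).length
    · rw [getD_mapIdx _ _ j [] [] hj, pvCell]
    · rw [List.getD_eq_default _ _ (by simp only [List.length_mapIdx]; omega), pvCell,
        List.getD_eq_default (t.getD i []) _ (by omega)]
      simp [pvStatus]
  · rw [pvCell, pvCell, List.getD_eq_default (pvApply t S) _ (by simp [pvApply]; omega),
      List.getD_eq_default t _ (by omega)]
    simp [pvStatus]

lemma length_apply (t : List (List (List String))) (S : List (Nat × Nat)) :
    (pvApply t S).length = t.length := by simp [pvApply]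

lemma rowLen_apply (t : List (List (List String))) (S : List (Nat × Nat)) (i : Nat) :
    pvRowLen (pvApply t S) i = pvRowLen t i := by
  by_cases hi : i < t.length
  · rw [pvRowLen, pvRowLen, pvApply, getD_mapIdx t _ i [] [] hi]
    simp
  · rw [pvRowLen, pvRowLen, List.getD_eq_default (pvApply t S) _ (by simp [pvApply]; omega),
      List.getD_eq_default t _ (by omega)]

lemma status_apply_old (t : List (List (List String))) (S : List (Nat × Nat)) (i j : Nat) :
    (pvStatus (pvCell (pvApply t S) i j) = "Old") ↔ (pvStatus (pvCell t i j) = "Old") := by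
  rw [cell_apply]
  split_ifs with h
  · rw [status_set_destroy (young_one_lt h.2), h.2]
    constructor <;> (intro hc; exact absurd hc (by decide))
  · rfl

lemma grid_ext {t t' : List (List (List String))} (hl : t.length = t'.length)
    (hr : ∀ i, pvRowLen t i = pvRowLen t' i) (hc : ∀ i j, pvCell t i j = pvCell t' i j) :
    t = t' := by
  apply List.ext_getElem hl
  intro i h1 h2
  apply List.ext_getElem
  · have := hr i
    rwa [pvRowLen, pvRowLen, List.getD_eq_getElem _ _ h1, List.getD_eq_getElem _ _ h2] at this
  · intro j hj1 hj2
    have := hc i j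
    rwa [pvCell, pvCell, List.getD_eq_getElem _ _ h1, List.getD_eq_getElem _ _ h2,
      List.getD_eq_getElem _ _ hj1, List.getD_eq_getElem _ _ hj2] at this

lemma apply_congr {t : List (List (List String))} {S S' : List (Nat × Nat)}
    (h : ∀ i j, pvStatus (pvCell t i j) = "Young" → ((i, j) ∈ S ↔ (i, j) ∈ S')) :
    pvApply t S = pvApply t S' := by
  apply grid_ext (by simp [length_apply]) (fun i => by simp [rowLen_apply])
  intro i j
  rw [cell_apply, cell_apply]
  by_cases hy : pvStatus (pvCell t i j) = "Young"
  · by_cases hm : (i, j) ∈ S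
    · rw [if_pos ⟨hm, hy⟩, if_pos ⟨(h i j hy).1 hm, hy⟩]
    · rw [if_neg (fun hc => hm hc.1), if_neg (fun hc => hm ((h i j hy).2 hc.1))]
  · simp [hy]

lemma status_apply_young (t : List (List (List String))) (S : List (Nat × Nat)) (i j : Nat) :
    pvStatus (pvCell (pvApply t S) i j) = "Young" ↔
      pvStatus (pvCell t i j) = "Young" ∧ (i, j) ∉ S := by
  rw [cell_apply]
  split_ifs with h
  · rw [status_set_destroy (young_one_lt h.2)]
    constructor
    · intro hc; exact absurd hc (by decide)
    · intro hc; exact absurd h.1 hc.2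
  · constructor
    · intro hy; exact ⟨hy, fun hm => h ⟨hm, hy⟩⟩
    · exact fun hc => hc.1

lemma apply_nil (t : List (List (List String))) : pvApply t [] = t := by
  apply grid_ext (by simp [length_apply]) (fun i => by simp [rowLen_apply])
  intro i j
  rw [cell_apply]
  simp

lemma rowLen_setD (T : List (List (List String))) (p q i : Nat) :
    pvRowLen (pvSetD T p q) i = pvRowLen T i := by
  by_cases hip : i = p
  · subst hip
    by_cases hp : i < T.length
    · rw [pvRowLen, pvSetD, getD_set_self _ _ _ _ hp]
      simp [pvRowLen]
    · rw [pvRowLen, pvSetD, List.getD_eq_default _ _ (by simp; omega),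
        pvRowLen, List.getD_eq_default _ _ (by omega)]
  · rw [pvRowLen, pvSetD, getD_set_ne _ _ _ _ _ hip, pvRowLen]

lemma cell_setD (T : List (List (List String))) (p q i j : Nat)
    (hp : p < T.length) (hq : q < pvRowLen T p) :
    pvCell (pvSetD T p q) i j =
      if i = p ∧ j = q then (pvCell T p q).set 1 "Destroy" else pvCell T i j := by
  by_cases hip : i = p
  · subst hip
    rw [pvCell, pvSetD, getD_set_self _ _ _ _ hp]
    by_cases hjq : j = q
    · subst hjq
      rw [getD_set_self _ _ _ _ hq]
      simp [pvCell]
    · rw [getD_set_ne _ _ _ _ _ hjq, if_neg (fun hc => hjq hc.2), pvCell]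
  · rw [pvCell, pvSetD, getD_set_ne _ _ _ _ _ hip, if_neg (fun hc => hip hc.1), pvCell]

lemma setD_apply {t : List (List (List String))} {p q : Nat} (S : List (Nat × Nat))
    (hY : pvStatus (pvCell t p q) = "Young") :
    pvSetD (pvApply t S) p q = pvApply t ((p, q) :: S) := by
  obtain ⟨hp, hq⟩ := young_lt hY
  have hp' : p < (pvApply t S).length := by rw [length_apply]; exact hp
  have hq' : q < pvRowLen (pvApply t S) p := by rw [rowLen_apply]; exact hq
  apply grid_ext
  · simp [pvSetD, length_apply]
  · intro i
    rw [rowLen_setD, rowLen_apply, rowLen_apply]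
  · intro i j
    rw [cell_setD _ _ _ _ _ hp' hq', cell_apply t ((p, q) :: S) i j]
    by_cases hpq : i = p ∧ j = q
    · obtain ⟨rfl, rfl⟩ := hpq
      rw [if_pos ⟨rfl, rfl⟩, if_pos ⟨List.mem_cons_self, hY⟩, cell_apply]
      split_ifs with h
      · rw [List.set_set]
      · rfl
    · rw [if_neg hpq, cell_apply]
      have hmem : ((i, j) ∈ (p, q) :: S) ↔ (i, j) ∈ S := by
        rw [List.mem_cons]
        constructor
        · rintro (heq | h)
          · simp only [Prod.mk.injEq] at heq
            exact absurd heq hpq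
          · exact h
        · exact Or.inr
      by_cases hc : (i, j) ∈ S ∧ pvStatus (pvCell t i j) = "Young"
      · rw [if_pos hc, if_pos ⟨hmem.2 hc.1, hc.2⟩]
      · rw [if_neg hc, if_neg (fun hcc => hc ⟨hmem.1 hcc.1, hcc.2⟩)]

lemma mark_apply (t : List (List (List String))) (S : List (Nat × Nat)) (p q : Nat) :
    pvMark (pvApply t S) p q = pvApply t ((p, q) :: S) := by
  rw [pvMark]
  by_cases hy : pvStatus (pvCell t p q) = "Young"
  · by_cases hm : (p, q) ∈ S
    · rw [if_neg (by rw [status_apply_young]; exact fun hc => hc.2 hm)]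
      refine apply_congr (fun i j _ => ?_)
      rw [List.mem_cons]
      constructor
      · exact Or.inr
      · rintro (heq | h)
        · simp only [Prod.mk.injEq] at heq
          obtain ⟨rfl, rfl⟩ := heq
          exact hm
        · exact h
    · rw [if_pos (by rw [status_apply_young]; exact ⟨hy, hm⟩)]
      exact setD_apply S hy
  · rw [if_neg (by rw [status_apply_young]; exact fun hc => hy hc.1)]
    refine apply_congr (fun i j hyij => ?_)
    rw [List.mem_cons]
    constructor
    · exact Or.inr
    · rintro (heq | h)
      · simp only [Prod.mk.injEq] at heq
        obtain ⟨rfl, rfl⟩ := heq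
        exact absurd hyij hy
      · exact h

lemma foldl_mark (t : List (List (List String))) (l : List (Nat × Nat)) :
    ∀ S, l.foldl (fun t pq => pvMark t pq.1 pq.2) (pvApply t S) = pvApply t (S ++ l) := by
  induction l with
  | nil => simp
  | cons hd tl ih =>
    intro S
    simp only [List.foldl_cons]
    rw [mark_apply, ih ((hd.1, hd.2) :: S)]
    exact apply_congr (fun i j _ => by simp; tauto)

lemma foldl_setD (t : List (List (List String))) (l : List (Nat × Nat))
    (hl : ∀ pq ∈ l, pvStatus (pvCell t pq.1 pq.2) = "Young") :
    ∀ S, l.foldl (fun t pq => pvSetD t pq.1 pq.2) (pvApply t S) = pvApply t (S ++ l) := by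
  induction l with
  | nil => simp
  | cons hd tl ih =>
    intro S
    simp only [List.foldl_cons]
    rw [setD_apply S (hl hd (by simp)), ih (fun pq h => hl pq (by simp [h]) ) ((hd.1, hd.2) :: S)]
    exact apply_congr (fun i j _ => by simp; tauto)

-- A's marks from cell (i, j) of the original grid
def pvG (t : List (List (List String))) (R i j : Nat) : List (Nat × Nat) :=
  if pvStatus (pvCell t i j) = "Old" then pvNbrs R (pvRowLen t i) i j else []

lemma rowLoop (t : List (List (List String))) (R i : Nat) :
    ∀ n S, (List.range n).foldl (pvRowStep R i) (pvApply t S) =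
      pvApply t (S ++ (List.range n).flatMap (pvG t R i)) := by
  intro n
  induction n with
  | zero => simp
  | succ n ih =>
    intro S
    rw [List.range_succ, List.foldl_append, ih, List.foldl_cons, List.foldl_nil, pvRowStep]
    by_cases hOld : pvStatus (pvCell t i n) = "Old"
    · rw [if_neg (not_not_intro ((status_apply_old _ _ _ _).2 hOld)), rowLen_apply, foldl_mark]
      congr 1
      rw [List.flatMap_append]
      simp [pvG, hOld, List.append_assoc]
    · rw [if_pos (fun hc => hOld ((status_apply_old _ _ _ _).1 hc))]
      congr 1
      rw [List.flatMap_append]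
      simp [pvG, hOld]

lemma outerLoop (t : List (List (List String))) (R : Nat) :
    ∀ n S, (List.range n).foldl (pvOuterStep R) (pvApply t S) =
      pvApply t (S ++ (List.range n).flatMap (fun i => (List.range (pvRowLen t i)).flatMap (pvG t R i))) := by
  intro n
  induction n with
  | zero => simp
  | succ n ih =>
    intro S
    rw [List.range_succ, List.foldl_append, ih, List.foldl_cons, List.foldl_nil, pvOuterStep,
      rowLen_apply, rowLoop]
    congr 1
    rw [List.flatMap_append]
    simp [List.append_assoc]

-- the set A marks, and the set B marks
def pvMList (t : List (List (List String))) : List (Nat × Nat) :=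
  (List.range t.length).flatMap (fun i => (List.range (pvRowLen t i)).flatMap (pvG t t.length i))

def pvDRow (t : List (List (List String))) (rows i : Nat) : List (Nat × Nat) :=
  (List.range (pvRowLen t i)).flatMap
    (fun j => if pvStatus (pvCell t i j) = "Young" ∧ pvNbOld t rows i j then [(i, j)] else [])

def pvDList (t : List (List (List String))) : List (Nat × Nat) :=
  (List.range t.length).flatMap (fun i => pvDRow t t.length i)

lemma A_eq (t : List (List (List String))) :
    mark_branches_for_destruction t = pvApply t (pvMList t) := by
  have h := outerLoop t t.length t.length []
  rw [apply_nil] at h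
  simpa [mark_branches_for_destruction, pvMList] using h

lemma rowCollect_aux (t : List (List (List String))) (rows i : Nat) :
    ∀ n acc, (List.range n).foldl
      (fun acc j =>
        if pvStatus (pvCell t i j) ≠ "Young" then acc
        else if pvNbOld t rows i j then acc ++ [(i, j)] else acc) acc =
      acc ++ (List.range n).flatMap
        (fun j => if pvStatus (pvCell t i j) = "Young" ∧ pvNbOld t rows i j then [(i, j)] else []) := by
  intro n
  induction n with
  | zero => simp
  | succ n ih =>
    intro acc
    rw [List.range_succ, List.foldl_append, ih, List.foldl_cons, List.foldl_nil,
      List.flatMap_append]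
    by_cases hy : pvStatus (pvCell t i n) = "Young"
    · by_cases hb : pvNbOld t rows i n
      · rw [if_neg (not_not_intro hy), if_pos hb]
        simp [hy, hb, List.append_assoc]
      · rw [if_neg (not_not_intro hy), if_neg hb]
        simp [hy, hb]
    · rw [if_pos hy]
      simp [hy]

lemma rowCollect_eq (t : List (List (List String))) (rows i : Nat) :
    ∀ acc, pvRowCollect t rows i acc = acc ++ pvDRow t rows i := by
  intro acc
  rw [pvRowCollect, pvDRow, rowCollect_aux]

lemma toDestroy_eq (t : List (List (List String))) :
    ∀ n acc, (List.range n).foldl (fun acc i => pvRowCollect t t.length i acc) acc =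
      acc ++ (List.range n).flatMap (fun i => pvDRow t t.length i) := by
  intro n
  induction n with
  | zero => simp
  | succ n ih =>
    intro acc
    rw [List.range_succ, List.foldl_append, List.flatMap_append, ih, List.foldl_cons,
      List.foldl_nil, rowCollect_eq]
    simp

lemma mem_DList {t : List (List (List String))} {i j : Nat} :
    (i, j) ∈ pvDList t ↔ i < t.length ∧ j < pvRowLen t i ∧
      pvStatus (pvCell t i j) = "Young" ∧ pvNbOld t t.length i j = true := by
  simp only [pvDList, pvDRow, List.mem_flatMap, List.mem_range]
  constructor
  · rintro ⟨p, hp, q, hq, hmem⟩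
    split_ifs at hmem with hc
    · simp at hmem
      obtain ⟨hi, hj⟩ := hmem
      subst hi; subst hj
      exact ⟨hp, hq, hc.1, hc.2⟩
    · simp at hmem
  · rintro ⟨hi, hj, hy, hb⟩
    exact ⟨i, hi, j, hj, by simp [hy, hb]⟩

lemma B_eq (t : List (List (List String))) :
    mark_branches_for_destruction_alt t = pvApply t (pvDList t) := by
  have hy : ∀ pq ∈ pvDList t, pvStatus (pvCell t pq.1 pq.2) = "Young" := by
    rintro ⟨i, j⟩ h
    exact (mem_DList.1 h).2.2.1
  have h := foldl_setD t (pvDList t) hy []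
  rw [apply_nil, List.nil_append] at h
  simpa [mark_branches_for_destruction_alt, toDestroy_eq, pvDList] using h

lemma mem_nbrs {R L p q i j : Nat} :
    (i, j) ∈ pvNbrs R L p q ↔
      (0 < p ∧ i = p - 1 ∧ j = q) ∨ (p < R - 1 ∧ i = p + 1 ∧ j = q) ∨
      (0 < q ∧ i = p ∧ j = q - 1) ∨ (q < L - 1 ∧ i = p ∧ j = q + 1) := by
  simp [pvNbrs, Prod.mk.injEq]

lemma mem_MList {t : List (List (List String))} {i j : Nat} :
    (i, j) ∈ pvMList t ↔ ∃ p < t.length, ∃ q < pvRowLen t p,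
      pvStatus (pvCell t p q) = "Old" ∧ (i, j) ∈ pvNbrs t.length (pvRowLen t p) p q := by
  simp only [pvMList, pvG, List.mem_flatMap, List.mem_range]
  constructor
  · rintro ⟨p, hp, q, hq, hmem⟩
    split_ifs at hmem with hc
    · exact ⟨p, hp, q, hq, hc, hmem⟩
    · simp at hmem
  · rintro ⟨p, hp, q, hq, hc, hmem⟩
    exact ⟨p, hp, q, hq, by simp [hc, hmem]⟩

lemma nbOld_iff (t : List (List (List String))) (rows i j : Nat) :
    pvNbOld t rows i j = true ↔
      ((0 < i ∧ j < pvRowLen t (i - 1) ∧ pvStatus (pvCell t (i - 1) j) = "Old") ∨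
       (i + 1 < rows ∧ j < pvRowLen t (i + 1) ∧ pvStatus (pvCell t (i + 1) j) = "Old") ∨
       (0 < j ∧ pvStatus (pvCell t i (j - 1)) = "Old") ∨
       (j + 1 < pvRowLen t i ∧ pvStatus (pvCell t i (j + 1)) = "Old")) := by
  simp [pvNbOld, and_assoc, or_assoc]

-- the heart of the matter: a Young cell is a neighbour of an Old cell iff one of its 4 neighbours is Old
lemma main_iff (t : List (List (List String))) (i j : Nat)
    (hY : pvStatus (pvCell t i j) = "Young") :
    (i, j) ∈ pvMList t ↔ (i, j) ∈ pvDList t := by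
  obtain ⟨hi, hj⟩ := young_lt hY
  rw [mem_MList, mem_DList, nbOld_iff]
  constructor
  · rintro ⟨p, hp, q, hq, hOld, hmem⟩
    refine ⟨hi, hj, hY, ?_⟩
    rcases mem_nbrs.1 hmem with ⟨hc, hieq, hjeq⟩ | ⟨hc, hieq, hjeq⟩ | ⟨hc, hieq, hjeq⟩ | ⟨hc, hieq, hjeq⟩
    · -- (i,j) = (p-1, q): down-neighbour of (i,j) is Old
      refine Or.inr (Or.inl ?_)
      have h1 : i + 1 = p := by omega
      rw [h1, hjeq]
      exact ⟨by omega, hq, hOld⟩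
    · -- (i,j) = (p+1, q): up-neighbour
      refine Or.inl ?_
      have h1 : i - 1 = p := by omega
      rw [h1, hjeq]
      exact ⟨by omega, hq, hOld⟩
    · -- (i,j) = (p, q-1): right-neighbour
      refine Or.inr (Or.inr (Or.inr ?_))
      have h1 : j + 1 = q := by omega
      rw [h1, hieq]
      exact ⟨by omega, hOld⟩
    · -- (i,j) = (p, q+1): left-neighbour
      refine Or.inr (Or.inr (Or.inl ?_))
      have h1 : j - 1 = q := by omega
      rw [h1, hieq]
      exact ⟨by omega, hOld⟩
  · rintro ⟨-, -, -, hup | hdown | hleft | hright⟩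
    · obtain ⟨hc, hq, hOld⟩ := hup
      refine ⟨i - 1, by omega, j, hq, hOld, mem_nbrs.2 ?_⟩
      exact Or.inr (Or.inl ⟨by omega, by omega, rfl⟩)
    · obtain ⟨hc, hq, hOld⟩ := hdown
      refine ⟨i + 1, hc, j, hq, hOld, mem_nbrs.2 ?_⟩
      exact Or.inl ⟨by omega, by omega, rfl⟩
    · obtain ⟨hc, hOld⟩ := hleft
      refine ⟨i, hi, j - 1, by omega, hOld, mem_nbrs.2 ?_⟩
      exact Or.inr (Or.inr (Or.inr ⟨by omega, rfl, by omega⟩))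
    · obtain ⟨hc, hOld⟩ := hright
      refine ⟨i, hi, j + 1, hc, hOld, mem_nbrs.2 ?_⟩
      exact Or.inr (Or.inr (Or.inl ⟨by omega, rfl, by omega⟩))

-- ===== VERDICT (by name: the statement is the Claim_ definition above) =====
theorem mark_branches_for_destruction_spec : Claim_equal_mark_branches_for_destruction := by
  intro tree _ _
  show mark_branches_for_destruction tree = mark_branches_for_destruction_alt tree
  rw [A_eq, B_eq]
  exact apply_congr (fun i j hy => main_iff tree i j hy)
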